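-- pv_equiv track=rewrite | github.com/bugen/pypipe | pypipe.py | extend_codes
-- ===== SOURCE A (Python) =====
-- def extend_codes(codes, comment=None):
--     not_empty_codes = []
--     if comment:
--         not_empty_codes.append(f"# {comment}")
--     if codes:
--         for _codes in codes:
--             not_empty_codes.extend(c.rstrip() for c in _codes.split("\n") if c.rstrip())
--     return not_empty_codes
-- ===== SOURCE B (Python) =====
-- def extend_codes(codes, comment=None):
--     out = []
--     if comment:
--         out.append(f"# {comment}")
--     for code in (codes or ()):
--         line = []   # committed chars of the current line (never ends in whitespace)
--         pend = []   # run of trailing whitespace not yet known to be interior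
--         for ch in code:
--             if ch == "\n":
--                 if line:
--                     out.append("".join(line))
--                 line = []
--                 pend = []
--             elif ch.isspace():
--                 pend.append(ch)
--             else:
--                 line.extend(pend)
--                 pend = []
--                 line.append(ch)
--         if line:
--             out.append("".join(line))
--     return out
-- ===== Notes on version B (the rewrite author's own statement) =====
-- stated objective: alternative
-- what changed: Replaces A's split('\n')/rstrip/filter pipeline per code string by a single character-level state machine that scans each string once, buffering trailing whitespace in a separate pending list (so rstrip never happens as an operation) and emitting the committed line on newline or end-of-string if non-empty.
import Mathlib
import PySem

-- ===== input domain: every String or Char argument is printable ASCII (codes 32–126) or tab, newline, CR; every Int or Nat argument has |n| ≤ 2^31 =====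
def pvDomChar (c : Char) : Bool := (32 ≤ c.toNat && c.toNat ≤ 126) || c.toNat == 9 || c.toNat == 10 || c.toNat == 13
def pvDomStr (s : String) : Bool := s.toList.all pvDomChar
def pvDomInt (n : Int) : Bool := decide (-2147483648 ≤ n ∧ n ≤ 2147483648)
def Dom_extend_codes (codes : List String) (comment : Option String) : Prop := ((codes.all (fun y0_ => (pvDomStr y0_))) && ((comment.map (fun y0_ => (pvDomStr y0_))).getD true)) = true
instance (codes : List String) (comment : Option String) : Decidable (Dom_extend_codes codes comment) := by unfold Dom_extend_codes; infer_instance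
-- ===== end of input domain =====

-- B replaces A's split/rstrip/filter pipeline by a one-pass character-level state machine
-- (pending-whitespace buffer instead of rstrip); return value proved equal on all inputs.

-- ===== PORT A =====
-- `s.split("\n")` (sep nonempty, so Python's split never raises)
def pySplitNl (s : String) : List String :=
  (PySem.Chars.splitOn s.toList ['\n']).map String.ofList

def extend_codes (codes : List String) (comment : Option String) : List String :=
  let not_empty_codes : List String :=
    match comment with
    | some c => if c ≠ "" then ["# " ++ c] else []
    | none => []
  if codes ≠ [] then
    codes.foldl (fun acc s =>
      acc ++ (pySplitNl s).filterMap (fun c =>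
        if PySem.Str.rstrip c ≠ "" then some (PySem.Str.rstrip c) else none)) not_empty_codes
  else not_empty_codes

-- ===== PORT B =====
-- state = (emitted lines, committed chars of current line, pending trailing whitespace)
def scanStep : List String × List Char × List Char → Char → List String × List Char × List Char
  | (acc, line, pend), ch =>
    if ch = '\n' then
      ((if line ≠ [] then acc ++ [String.ofList line] else acc), [], [])
    else if PySem.Chars.isspace ch then
      (acc, line, pend ++ [ch])
    else
      (acc, line ++ pend ++ [ch], [])

def scanCode (acc : List String) (code : String) : List String :=
  let r := code.toList.foldl scanStep (acc, [], [])
  if r.2.1 ≠ [] then r.1 ++ [String.ofList r.2.1] else r.1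

def extend_codes_alt (codes : List String) (comment : Option String) : List String :=
  let out : List String :=
    match comment with
    | some c => if c ≠ "" then ["# " ++ c] else []
    | none => []
  codes.foldl scanCode out

-- ===== PRECONDITION & SPEC =====
def Spec_extend_codes (codes : List String) (comment : Option String) (out : List String) : Prop := out = extend_codes_alt codes comment
instance (codes : List String) (comment : Option String) (out : List String) : Decidable (Spec_extend_codes codes comment out) := by unfold Spec_extend_codes; infer_instance

-- ===== CLAIM =====
def Claim_equal_extend_codes : Prop := ∀ (codes : List String) (comment : Option String), Dom_extend_codes codes comment → Spec_extend_codes codes comment (extend_codes codes comment)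

-- ===== LEMMAS AND PROOFS =====

-- structural characterisation of splitting on '\n': (first piece, remaining pieces)
def splitPair : List Char → List Char × List (List Char)
  | [] => ([], [])
  | c :: rest =>
    let r := splitPair rest
    if c = '\n' then ([], r.1 :: r.2) else (c :: r.1, r.2)

theorem go_eq (l : List Char) : ∀ (fuel : Nat) (cur : List Char) (acc : List (List Char)),
    l.length < fuel →
    PySem.Chars.splitOn.go ['\n'] fuel l cur acc
      = acc.reverse ++ (cur.reverse ++ (splitPair l).1) :: (splitPair l).2 := by
  induction l with
  | nil =>
    intro fuel cur acc h
    match fuel, h with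
    | fuel + 1, _ => simp [PySem.Chars.splitOn.go, splitPair]
  | cons c rest ih =>
    intro fuel cur acc h
    match fuel, h with
    | fuel + 1, h =>
      by_cases hc : c = '\n'
      · subst hc
        have : PySem.Chars.splitOn.go ['\n'] (fuel + 1) ('\n' :: rest) cur acc
            = PySem.Chars.splitOn.go ['\n'] fuel rest [] (cur.reverse :: acc) := by
          simp [PySem.Chars.splitOn.go, List.isPrefixOf]
        rw [this, ih fuel [] (cur.reverse :: acc) (by simpa using Nat.lt_of_succ_lt_succ h)]
        simp [splitPair]
      · have : PySem.Chars.splitOn.go ['\n'] (fuel + 1) (c :: rest) cur acc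
            = PySem.Chars.splitOn.go ['\n'] fuel rest (c :: cur) acc := by
          simp [PySem.Chars.splitOn.go, List.isPrefixOf, Ne.symm hc]
        rw [this, ih fuel (c :: cur) acc (by simpa using Nat.lt_of_succ_lt_succ h)]
        simp [splitPair, hc]

theorem splitPair_cons_nl (rest : List Char) :
    splitPair ('\n' :: rest) = ([], (splitPair rest).1 :: (splitPair rest).2) := by
  simp [splitPair]

theorem splitOn_nl_eq (s : List Char) :
    PySem.Chars.splitOn s ['\n'] = (splitPair s).1 :: (splitPair s).2 := by
  unfold PySem.Chars.splitOn
  simpa using go_eq s (s.length + 1) [] [] (Nat.lt_succ_self _)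

-- rstrip ignores an all-whitespace suffix
theorem rstrip_append_space (a w : List Char) (hw : w.all PySem.Chars.isspace = true) :
    PySem.Chars.rstrip (a ++ w) = PySem.Chars.rstrip a := by
  unfold PySem.Chars.rstrip
  rw [List.reverse_append, List.dropWhile_append]
  have : w.reverse.dropWhile PySem.Chars.isspace = [] := by
    rw [List.dropWhile_eq_nil_iff]
    intro x hx
    exact List.all_eq_true.mp hw x (List.mem_reverse.mp hx)
  simp [this]

-- rstrip is the identity on a list ending in a non-whitespace char
theorem rstrip_snoc_nonspace (a : List Char) (c : Char) (hc : PySem.Chars.isspace c = false) :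
    PySem.Chars.rstrip (a ++ [c]) = a ++ [c] := by
  unfold PySem.Chars.rstrip
  simp [hc]

-- the char-level filterMap B's scan is proved equal to
def pieceOut (p : List Char) : Option String :=
  if PySem.Chars.rstrip p ≠ [] then some (String.ofList (PySem.Chars.rstrip p)) else none

-- invariant of the scan loop: pend is all whitespace, line is rstrip-fixed
theorem scan_go (l : List Char) : ∀ (acc : List String) (line pend : List Char),
    pend.all PySem.Chars.isspace = true →
    PySem.Chars.rstrip line = line →
    (let r := l.foldl scanStep (acc, line, pend);
     if r.2.1 ≠ [] then r.1 ++ [String.ofList r.2.1] else r.1)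
      = acc ++ ((line ++ pend ++ (splitPair l).1) :: (splitPair l).2).filterMap pieceOut := by
  induction l with
  | nil =>
    intro acc line pend hp hl
    have h1 : PySem.Chars.rstrip (line ++ pend) = line := by
      rw [rstrip_append_space _ _ hp, hl]
    simp only [List.foldl_nil, splitPair, List.append_nil, List.filterMap_cons,
      List.filterMap_nil, pieceOut, h1]
    by_cases hline : line = [] <;> simp [hline]
  | cons c rest ih =>
    intro acc line pend hp hl
    by_cases hnl : c = '\n'
    · subst hnl
      have hstep : scanStep (acc, line, pend) '\n'
          = ((if line ≠ [] then acc ++ [String.ofList line] else acc), [], []) := by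
        simp [scanStep]
      have h1 : PySem.Chars.rstrip (line ++ pend) = line := by
        rw [rstrip_append_space _ _ hp, hl]
      have h2 : pieceOut (line ++ pend) = if line ≠ [] then some (String.ofList line) else none := by
        simp only [pieceOut, h1]
      rw [List.foldl_cons, hstep,
        ih _ [] [] (by simp) (by simp [PySem.Chars.rstrip])]
      simp only [splitPair_cons_nl, List.append_nil, List.nil_append, List.filterMap_cons, h2]
      by_cases hline : line = [] <;> simp [hline]
    · by_cases hsp : PySem.Chars.isspace c = true
      · have hstep : scanStep (acc, line, pend) c = (acc, line, pend ++ [c]) := by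
          simp [scanStep, hnl, hsp]
        rw [List.foldl_cons, hstep,
          ih _ line (pend ++ [c]) (by simp [List.all_append, hp, hsp]) hl]
        simp [splitPair, hnl, List.append_assoc]
      · have hsp' : PySem.Chars.isspace c = false := by simpa using hsp
        have hstep : scanStep (acc, line, pend) c = (acc, line ++ pend ++ [c], []) := by
          simp [scanStep, hnl, hsp']
        rw [List.foldl_cons, hstep,
          ih _ (line ++ pend ++ [c]) [] (by simp)
            (rstrip_snoc_nonspace _ _ hsp')]
        simp [splitPair, hnl, List.append_assoc]

-- String-level piece processing (A's comprehension body) equals pieceOut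
theorem strPiece_eq (p : List Char) :
    (if PySem.Str.rstrip (String.ofList p) ≠ "" then some (PySem.Str.rstrip (String.ofList p)) else none)
      = pieceOut p := by
  have hr : PySem.Str.rstrip (String.ofList p) = String.ofList (PySem.Chars.rstrip p) := by
    apply String.ext
    simp [PySem.Str.toList_rstrip]
  rw [hr]
  unfold pieceOut
  by_cases h : PySem.Chars.rstrip p = []
  · rw [h]
    simp only [ne_eq, ite_not]
  · have : String.ofList (PySem.Chars.rstrip p) ≠ "" := by
      intro he
      exact h (by simpa using congrArg String.toList he)
    simp [h, this]

-- per code string, B's scan appends exactly what A's split/rstrip/filter appends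
theorem scanCode_eq (acc : List String) (s : String) :
    scanCode acc s
      = acc ++ (pySplitNl s).filterMap (fun c =>
          if PySem.Str.rstrip c ≠ "" then some (PySem.Str.rstrip c) else none) := by
  unfold scanCode pySplitNl
  rw [scan_go s.toList acc [] [] (by simp) (by simp [PySem.Chars.rstrip]),
    splitOn_nl_eq, List.filterMap_map]
  simp only [List.nil_append]
  exact congrArg (fun x => acc ++ x)
    (List.filterMap_congr (fun p _ => (strPiece_eq p).symm))

-- the two folds agree from any start
theorem folds_eq (codes : List String) : ∀ (init : List String),
    codes.foldl (fun acc s =>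
      acc ++ (pySplitNl s).filterMap (fun c =>
        if PySem.Str.rstrip c ≠ "" then some (PySem.Str.rstrip c) else none)) init
      = codes.foldl scanCode init := by
  induction codes with
  | nil => intro init; rfl
  | cons s rest ih =>
    intro init
    rw [List.foldl_cons, List.foldl_cons, ih, scanCode_eq]

-- ===== VERDICT (by name: the statement is the Claim_ definition above) =====
theorem extend_codes_spec : Claim_equal_extend_codes := by
  intro codes comment _
  unfold Spec_extend_codes extend_codes extend_codes_alt
  by_cases h : codes = []
  · simp [h]
  · simp only [h, ne_eq, not_false_iff, if_true]
    exact folds_eq codes _
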